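-- pv_equiv track=rewrite | github.com/nayuki/Project-Euler-solutions | python/p315.py | number_to_segments
-- ===== SOURCE A (Python) =====
-- def number_to_segments(n):
-- 	if n < 0:
-- 		raise ValueError()
-- 	result = 0
-- 	i = 0
-- 	while True:
-- 		result |= DECIMAL_DIGIT_TO_SEGMENT[n % 10] << (i * 7)
-- 		n //= 10
-- 		i += 1
-- 		if n == 0:
-- 			return result
--
-- DECIMAL_DIGIT_TO_SEGMENT = [0b1110111, 0b0010010, 0b1011101, 0b1011011, 0b0111010, 0b1101011, 0b1101111, 0b1110010, 0b1111111, 0b1111011]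
-- ===== SOURCE B (Python) =====
-- DECIMAL_DIGIT_TO_SEGMENT = [0b1110111, 0b0010010, 0b1011101, 0b1011011, 0b0111010, 0b1101011, 0b1101111, 0b1110010, 0b1111111, 0b1111011]
--
-- def number_to_segments(n):
-- 	if n < 0:
-- 		raise ValueError()
-- 	if n < 10:
-- 		return DECIMAL_DIGIT_TO_SEGMENT[n]
-- 	return (number_to_segments(n // 10) << 7) | DECIMAL_DIGIT_TO_SEGMENT[n % 10]
-- ===== Notes on version B (the rewrite author's own statement) =====
-- stated objective: simpler
-- what changed: Replaces the iterative do-while loop with its explicit shift counter and OR-accumulator by a direct structural recursion on the decimal digits: the high digits' mask is computed recursively and shifted left by 7, removing the result/i loop state.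
import Mathlib
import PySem

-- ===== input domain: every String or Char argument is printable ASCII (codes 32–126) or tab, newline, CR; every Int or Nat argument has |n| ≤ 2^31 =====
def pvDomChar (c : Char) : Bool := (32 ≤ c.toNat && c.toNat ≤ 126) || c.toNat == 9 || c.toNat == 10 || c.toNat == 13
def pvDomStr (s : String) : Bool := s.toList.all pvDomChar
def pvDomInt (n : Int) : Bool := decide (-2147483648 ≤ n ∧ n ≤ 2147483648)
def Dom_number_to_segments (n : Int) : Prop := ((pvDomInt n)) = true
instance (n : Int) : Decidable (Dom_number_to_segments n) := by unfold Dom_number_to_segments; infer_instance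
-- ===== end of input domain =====

-- B replaces A's do-while loop with its shift counter and OR-accumulator by a direct
-- structural recursion on the decimal digits (objective: simpler).

-- ===== PORT A =====
-- module constant DECIMAL_DIGIT_TO_SEGMENT (shared by both Pythons)
def DECIMAL_DIGIT_TO_SEGMENT : List Int :=
  [0b1110111, 0b0010010, 0b1011101, 0b1011011, 0b0111010, 0b1101011, 0b1101111, 0b1110010, 0b1111111, 0b1111011]

-- the do-while loop of A; state (n, result, i).  DECIMAL_DIGIT_TO_SEGMENT[n % 10] is ported
-- with getD: for 0 ≤ n the index mod n 10 is in 0..9, so this is exact on Pre_.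
-- i is Python's nonnegative loop counter, kept as Nat (i*7 is the nonneg shift amount of <<).
-- the 'n ≤ 0' branch is a pure totality guard: unreachable for 0 ≤ n (A raises on n < 0).
def pvLoopA (n result : Int) (i : Nat) : Int :=
  let result' := PySem.Int.bor result ((DECIMAL_DIGIT_TO_SEGMENT.getD (PySem.Int.mod n 10).toNat 0) <<< (i * 7))
  let n' := PySem.Int.floordiv n 10
  if n' = 0 then result'
  else if n ≤ 0 then result'
  else pvLoopA n' result' (i + 1)
termination_by n.toNat
decreasing_by
  rename_i _ h2
  have : PySem.Int.floordiv n 10 = n / 10 := by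
    simp [PySem.Int.floordiv, Int.fdiv_eq_ediv_of_nonneg n (by norm_num : (0:Int) ≤ 10)]
  omega

def number_to_segments (n : Int) : Int :=
  if n < 0 then 0   -- Python raises ValueError here; excluded by Pre_
  else pvLoopA n 0 0

-- ===== PORT B =====
-- recursion on the decimal digits; indexing is exact on Pre_ as in port A.
def number_to_segments_alt (n : Int) : Int :=
  if n < 0 then 0   -- Python raises ValueError here; excluded by Pre_
  else if n < 10 then DECIMAL_DIGIT_TO_SEGMENT.getD n.toNat 0
  else PySem.Int.bor ((number_to_segments_alt (PySem.Int.floordiv n 10)) <<< (7 : Nat))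
         (DECIMAL_DIGIT_TO_SEGMENT.getD (PySem.Int.mod n 10).toNat 0)
termination_by n.toNat
decreasing_by
  have : PySem.Int.floordiv n 10 = n / 10 := by
    simp [PySem.Int.floordiv, Int.fdiv_eq_ediv_of_nonneg n (by norm_num : (0:Int) ≤ 10)]
  omega

-- ===== PRECONDITION & SPEC =====
-- Pre_ excludes exactly n < 0, where A raises ValueError (and B does too).
def Pre_number_to_segments (n : Int) : Prop := 0 ≤ n
instance (n : Int) : Decidable (Pre_number_to_segments n) := by unfold Pre_number_to_segments; infer_instance
def pvWitness_number_to_segments : Int := (315)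

def Spec_number_to_segments (n : Int) (out : Int) : Prop := out = number_to_segments_alt n
instance (n : Int) (out : Int) : Decidable (Spec_number_to_segments n out) := by unfold Spec_number_to_segments; infer_instance

-- ===== CLAIM (what is proved, stated in full; the proofs are below) =====
def Claim_equal_number_to_segments : Prop := ∀ (n : Int), Dom_number_to_segments n → Pre_number_to_segments n → Spec_number_to_segments n (number_to_segments n)

-- ===== LEMMAS AND PROOFS =====

-- Nat-level model of B's recursion
def pvSegNat (n : Nat) : Nat :=
  if n < 10 then [119, 18, 93, 91, 58, 107, 111, 114, 127, 123].getD n 0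
  else (pvSegNat (n / 10)) <<< 7 ||| [119, 18, 93, 91, 58, 107, 111, 114, 127, 123].getD (n % 10) 0
termination_by n
decreasing_by omega

theorem pvTable_cast (j : Nat) :
    DECIMAL_DIGIT_TO_SEGMENT.getD j 0 = (([119, 18, 93, 91, 58, 107, 111, 114, 127, 123].getD j 0 : Nat) : Int) := by
  rcases j with _|_|_|_|_|_|_|_|_|_|j <;> simp [DECIMAL_DIGIT_TO_SEGMENT, List.getD]

theorem pvShift_cast (m k : Nat) : ((m : Int) <<< k) = ((m <<< k : Nat) : Int) := by
  exact_mod_cast rfl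

theorem pvOr_shiftLeft (x y k : Nat) : (x ||| y) <<< k = (x <<< k) ||| (y <<< k) := by
  apply Nat.eq_of_testBit_eq; intro i
  simp [Nat.testBit_shiftLeft, Nat.testBit_or, Bool.and_or_distrib_left]

theorem pvFloordiv10 (n : Int) : PySem.Int.floordiv n 10 = n / 10 := by
  simp [PySem.Int.floordiv, Int.fdiv_eq_ediv_of_nonneg n (by norm_num : (0:Int) ≤ 10)]

theorem pvMod10 (n : Int) : PySem.Int.mod n 10 = n % 10 := by
  simp [PySem.Int.mod]; rw [Int.fmod_eq_emod]; norm_num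

theorem pvAlt_eq_segNat : ∀ (m : Nat) (n : Int), 0 ≤ n → n.toNat = m →
    number_to_segments_alt n = (pvSegNat m : Int) := by
  intro m
  induction m using Nat.strong_induction_on with
  | _ m ih =>
    intro n hn hm
    rw [number_to_segments_alt, if_neg (by omega : ¬ n < 0)]
    by_cases h10 : n < 10
    · rw [if_pos h10, pvSegNat, if_pos (by omega : m < 10), pvTable_cast, hm]
    · rw [if_neg h10, pvSegNat, if_neg (by omega : ¬ m < 10)]
      rw [pvFloordiv10, pvMod10, pvTable_cast]
      rw [ih (m / 10) (by omega) (n / 10) (by omega) (by omega)]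
      have h2 : (n % 10).toNat = m % 10 := by omega
      rw [h2, pvShift_cast, PySem.Int.bor_natCast]

theorem pvLoopA_eq : ∀ (m : Nat) (n : Int), 0 ≤ n → n.toNat = m → ∀ (res i : Nat),
    pvLoopA n (res : Int) i = ((res ||| (pvSegNat m) <<< (i * 7) : Nat) : Int) := by
  intro m
  induction m using Nat.strong_induction_on with
  | _ m ih =>
    intro n hn hm res i
    rw [pvLoopA]
    simp only [pvFloordiv10, pvMod10, pvTable_cast, pvShift_cast, PySem.Int.bor_natCast]
    by_cases h0 : n / 10 = 0
    · rw [if_pos h0]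
      have h2 : (n % 10).toNat = m := by omega
      rw [h2]
      congr 1
      rw [pvSegNat, if_pos (by omega : m < 10)]
    · rw [if_neg h0, if_neg (by omega : ¬ n ≤ 0)]
      rw [ih ((n / 10).toNat) (by omega) (n / 10) (by omega) rfl]
      have h1 : (n / 10).toNat = m / 10 := by omega
      have h2 : (n % 10).toNat = m % 10 := by omega
      rw [h1, h2]
      congr 1
      conv_rhs => rw [pvSegNat]
      rw [if_neg (by omega : ¬ m < 10), pvOr_shiftLeft]
      have hsh : (pvSegNat (m / 10) <<< 7) <<< (i * 7) = pvSegNat (m / 10) <<< ((i + 1) * 7) := by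
        rw [← Nat.shiftLeft_add]
        congr 1
        omega
      rw [hsh, Nat.or_assoc, Nat.or_comm (_ <<< (i * 7)) _]

theorem number_to_segments_eq (n : Int) (h : 0 ≤ n) :
    number_to_segments n = number_to_segments_alt n := by
  have h1 : pvLoopA n ((0 : Nat) : Int) 0 = ((0 ||| (pvSegNat n.toNat) <<< (0 * 7) : Nat) : Int) :=
    pvLoopA_eq n.toNat n h rfl 0 0
  simp only [Nat.zero_or, Nat.zero_mul, Nat.shiftLeft_zero, Nat.cast_zero] at h1
  rw [number_to_segments, if_neg (by omega : ¬ n < 0), h1,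
    pvAlt_eq_segNat n.toNat n h rfl]

-- ===== VERDICT (by name: the statement is the Claim_ definition above) =====
theorem number_to_segments_spec : Claim_equal_number_to_segments := by
  intro n _ hpre
  show number_to_segments n = number_to_segments_alt n
  exact number_to_segments_eq n hpre
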